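-- pv_equiv track=rewrite | github.com/Hal-ws/--Algorithm-Problem-Solving | 2138.py | changing
-- ===== SOURCE A (Python) =====
-- def changing(sIdx, start, target, N):
--     diffChk = [0] * N
--     cnt = 0
--     for i in range(N):
--         if start[i] != target[i]:
--             diffChk[i] = 1
--         else:
--             diffChk[i] = 0
--     if sIdx == 0:
--         diffChk[0] = (diffChk[0] + 1) % 2
--         diffChk[1] = (diffChk[1] + 1) % 2
--         cnt = 1
--     for i in range(1, N):
--         if i - 1 >= 0:
--             if diffChk[i - 1]:
--                 cnt += 1
--                 diffChk[i - 1] = 0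
--                 diffChk[i] = (diffChk[i] + 1) % 2
--                 if i + 1 < N:
--                     diffChk[i + 1] = (diffChk[i + 1] + 1) % 2
--     for i in range(N):
--         if diffChk[i]:
--             return 100001
--     return cnt
-- ===== SOURCE B (Python) =====
-- def changing(sIdx, start, target, N):
--     # Closed-form solution of the forced press system over GF(2):
--     # press indicators satisfy p_i = d[i-1] ^ p_{i-1} ^ p_{i-2}; by the period-3
--     # Fibonacci-mod-2 pattern, p_i = (prefix parity of class (i-1) mod 3)
--     #                              ^ (prefix parity of class (i-2) mod 3),
--     # and the board is solvable iff the residual p_N is 0.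
--     d = [start[i] != target[i] for i in range(N)]
--     cnt = 1 if sIdx == 0 else 0
--     if sIdx == 0:
--         d[0] = not d[0]
--         d[1] = not d[1]
--     # a, b, c: parities of d[k] over k ≡ i-1, i-2, i-3 (mod 3) among processed k
--     a = b = c = False
--     p = False
--     for i in range(1, N + 1):
--         a = a != d[i - 1]
--         p = a != b
--         if p and i < N:
--             cnt += 1
--         a, b, c = c, a, b
--     return 100001 if p else cnt
-- ===== Notes on version B (the rewrite author's own statement) =====
-- stated objective: alternative
-- what changed: B abandons the greedy toggle simulation entirely: it solves the forced press system over GF(2) in closed form - each press indicator p_i is the XOR of two mod-3 residue-class prefix parities of the diff array (the period-3 Fibonacci-mod-2 convolution), cnt is the number of i with p_i set, and infeasibility is decided by the single residual value p_N instead of mutating and rescanning an array.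
import Mathlib
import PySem

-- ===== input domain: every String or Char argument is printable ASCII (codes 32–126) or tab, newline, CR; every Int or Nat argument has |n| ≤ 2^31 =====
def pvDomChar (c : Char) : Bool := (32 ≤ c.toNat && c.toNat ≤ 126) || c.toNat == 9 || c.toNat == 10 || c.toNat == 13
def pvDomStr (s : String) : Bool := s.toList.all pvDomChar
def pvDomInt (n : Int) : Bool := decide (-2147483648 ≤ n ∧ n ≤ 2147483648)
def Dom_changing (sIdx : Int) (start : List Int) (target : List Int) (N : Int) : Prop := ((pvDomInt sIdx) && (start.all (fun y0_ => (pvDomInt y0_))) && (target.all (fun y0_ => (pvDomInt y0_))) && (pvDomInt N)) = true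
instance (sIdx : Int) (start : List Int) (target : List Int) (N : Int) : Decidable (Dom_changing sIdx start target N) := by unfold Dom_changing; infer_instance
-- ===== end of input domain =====

-- B replaces A's greedy toggle simulation (mutable diff array, in-place flips, final rescan)
-- by a closed-form GF(2) solution: each press indicator is the XOR of two mod-3 residue-class
-- prefix parities of the diff array, and feasibility is read off the single residual value.

-- ===== PORT A =====
def changing (sIdx : Int) (start : List Int) (target : List Int) (N : Int) : Int :=
  let diffChk : List Int :=
    (PySem.List.pyRange 0 N 1).foldl
      (fun d i =>
        if PySem.List.pyGetD start i 0 ≠ PySem.List.pyGetD target i 0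
        then PySem.List.pySetD d i 1 else PySem.List.pySetD d i 0)
      (List.replicate N.toNat 0)
  let st : List Int × Int :=
    if sIdx = 0 then
      let d := PySem.List.pySetD diffChk 0 (PySem.Int.mod (PySem.List.pyGetD diffChk 0 0 + 1) 2)
      let d := PySem.List.pySetD d 1 (PySem.Int.mod (PySem.List.pyGetD d 1 0 + 1) 2)
      (d, 1)
    else (diffChk, 0)
  let s : List Int × Int :=
    (PySem.List.pyRange 1 N 1).foldl
      (fun (s : List Int × Int) i =>
        let d := s.1
        let cnt := s.2
        if i - 1 ≥ 0 then
          if PySem.List.pyGetD d (i - 1) 0 ≠ 0 then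
            let cnt := cnt + 1
            let d := PySem.List.pySetD d (i - 1) 0
            let d := PySem.List.pySetD d i (PySem.Int.mod (PySem.List.pyGetD d i 0 + 1) 2)
            let d := if i + 1 < N then PySem.List.pySetD d (i + 1) (PySem.Int.mod (PySem.List.pyGetD d (i + 1) 0 + 1) 2) else d
            (d, cnt)
          else (d, cnt)
        else (d, cnt))
      st
  -- Python's early 'return 100001' inside the scan loop = any nonzero entry
  if (PySem.List.pyRange 0 N 1).any (fun i => PySem.List.pyGetD s.1 i 0 ≠ 0) then 100001 else s.2

-- ===== PORT B =====
def changing_alt (sIdx : Int) (start : List Int) (target : List Int) (N : Int) : Int :=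
  let diff : List Bool :=
    (PySem.List.pyRange 0 N 1).map
      (fun i => decide (PySem.List.pyGetD start i 0 ≠ PySem.List.pyGetD target i 0))
  let cnt : Int := if sIdx = 0 then 1 else 0
  let diff : List Bool :=
    if sIdx = 0 then
      let d := PySem.List.pySetD diff 0 (! PySem.List.pyGetD diff 0 false)
      PySem.List.pySetD d 1 (! PySem.List.pyGetD d 1 false)
    else diff
  -- state (a, b, c, p, cnt): a, b, c are the mod-3 residue-class prefix parities of diff
  let s : Bool × Bool × Bool × Bool × Int :=
    (PySem.List.pyRange 1 (N + 1) 1).foldl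
      (fun (s : Bool × Bool × Bool × Bool × Int) i =>
        let a := s.1 != PySem.List.pyGetD diff (i - 1) false
        let p := a != s.2.1
        let cnt := if p ∧ i < N then s.2.2.2.2 + 1 else s.2.2.2.2
        (s.2.2.1, a, s.2.1, p, cnt))
      (false, false, false, false, cnt)
  if s.2.2.2.1 then 100001 else s.2.2.2.2

-- ===== PRECONDITION & SPEC =====
-- Pre_ excludes exactly the inputs where Python A raises IndexError:
-- N beyond either list's length, or sIdx == 0 with N < 2 (diffChk[1] out of range).
def Pre_changing (sIdx : Int) (start : List Int) (target : List Int) (N : Int) : Prop :=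
  N ≤ (start.length : Int) ∧ N ≤ (target.length : Int) ∧ (sIdx = 0 → 2 ≤ N)
instance (sIdx : Int) (start : List Int) (target : List Int) (N : Int) : Decidable (Pre_changing sIdx start target N) := by unfold Pre_changing; infer_instance

def pvWitness_changing : Int × List Int × List Int × Int := (0, [1, 0, 1], [0, 0, 1], 3)

def Spec_changing (sIdx : Int) (start : List Int) (target : List Int) (N : Int) (out : Int) : Prop := out = changing_alt sIdx start target N
instance (sIdx : Int) (start : List Int) (target : List Int) (N : Int) (out : Int) : Decidable (Spec_changing sIdx start target N out) := by unfold Spec_changing; infer_instance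

-- ===== CLAIM (what is proved, stated in full; the proofs are below) =====
def Claim_equal_changing : Prop := ∀ (sIdx : Int) (start : List Int) (target : List Int) (N : Int), Dom_changing sIdx start target N → Pre_changing sIdx start target N → Spec_changing sIdx start target N (changing sIdx start target N)

-- ===== LEMMAS AND PROOFS =====

/-- `1` for a set light, `0` for a clear one (A's integer encoding of booleans). -/
def pvB2i (b : Bool) : Int := if b then 1 else 0

/-- The greedy pass A's loop implements: `p` is the effective diff value at the
previous index, `pend` a toggle scheduled for the head of the remaining list, `c` the count. -/
def pvGreedy (p pend : Bool) (c : Int) : List Bool → Bool × Int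
  | [] => (p, c)
  | x :: xs =>
    let cur := x != pend
    if p then pvGreedy (!cur) true (c + 1) xs else pvGreedy cur false c xs

def pvFlipHead : List Bool → List Bool
  | [] => []
  | x :: xs => (!x) :: xs

theorem pvGreedy_pend (p : Bool) (c : Int) (l : List Bool) :
    pvGreedy p true c l = pvGreedy p false c (pvFlipHead l) := by
  cases l with
  | nil => rfl
  | cons y ys => cases y <;> cases p <;> simp [pvGreedy, pvFlipHead]

theorem pvMod2_flip (x : Bool) : PySem.Int.mod (pvB2i x + 1) 2 = pvB2i (!x) := by
  cases x <;> decide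

/-- reading an element just past a prefix -/
theorem pvGetD_append_len {α : Type} (P : List α) (y : α) (l : List α) (d : α) :
    PySem.List.pyGetD (P ++ y :: l) (P.length : Int) d = y := by
  rw [PySem.List.pyGetD_natCast]
  simp

theorem pvSetD_append_len {α : Type} (P : List α) (y : α) (l : List α) (v : α) :
    PySem.List.pySetD (P ++ y :: l) (P.length : Int) v = P ++ v :: l := by
  rw [PySem.List.pySetD_natCast]
  simp

/-- A's main loop, related to `pvGreedy` over the boolean suffix. -/
theorem pvLoopA (N : Int) : ∀ (m : Nat) (xs : List Bool) (P : List Int) (p : Bool) (c : Int) (j : Int),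
    xs.length = m → 1 ≤ j → (j - 1) = (P.length : Int) → N = j + xs.length →
    (PySem.List.pyRange j N 1).foldl
      (fun (s : List Int × Int) i =>
        if i - 1 ≥ 0 then
          if PySem.List.pyGetD s.1 (i - 1) 0 ≠ 0 then
            (if i + 1 < N then
              PySem.List.pySetD
                (PySem.List.pySetD (PySem.List.pySetD s.1 (i - 1) 0) i
                  (PySem.Int.mod (PySem.List.pyGetD (PySem.List.pySetD s.1 (i - 1) 0) i 0 + 1) 2))
                (i + 1)
                (PySem.Int.mod
                  (PySem.List.pyGetD
                    (PySem.List.pySetD (PySem.List.pySetD s.1 (i - 1) 0) i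
                      (PySem.Int.mod (PySem.List.pyGetD (PySem.List.pySetD s.1 (i - 1) 0) i 0 + 1) 2))
                    (i + 1) 0 + 1) 2)
            else
              PySem.List.pySetD (PySem.List.pySetD s.1 (i - 1) 0) i
                (PySem.Int.mod (PySem.List.pyGetD (PySem.List.pySetD s.1 (i - 1) 0) i 0 + 1) 2),
            s.2 + 1)
          else (s.1, s.2)
        else (s.1, s.2))
      (P ++ pvB2i p :: xs.map pvB2i, c)
    = (P ++ (List.replicate xs.length 0 ++ [pvB2i (pvGreedy p false c xs).1]), (pvGreedy p false c xs).2) := by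
  intro m
  induction m with
  | zero =>
    intro xs P p c j hx hj hP hN
    have hxs : xs = [] := List.length_eq_zero_iff.mp hx
    subst hxs
    have hle : N ≤ j := by simp at hN; omega
    rw [PySem.List.pyRange_one_eq_nil hle]
    simp [pvGreedy]
  | succ m ih =>
    intro xs P p c j hx hj hP hN
    cases xs with
    | nil => simp at hx
    | cons x xs' =>
      have hx' : xs'.length = m := by simpa using hx
      have hN' : N = j + 1 + (m + 1) - 1 := by simp [hN, hx']; omega
      have hlt : j < N := by omega
      have hge : j - 1 ≥ 0 := by omega
      have e1 : PySem.List.pyGetD (P ++ pvB2i p :: (x :: xs').map pvB2i) (j - 1) 0 = pvB2i p := by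
        rw [hP]; exact pvGetD_append_len P _ _ 0
      rw [PySem.List.pyRange_one_cons hlt, List.foldl_cons]
      dsimp only
      rw [if_pos hge, e1]
      cases p with
      | false =>
        rw [if_neg (by simp [pvB2i])]
        have hre : P ++ pvB2i false :: (x :: xs').map pvB2i
            = (P ++ [0]) ++ pvB2i x :: xs'.map pvB2i := by simp [pvB2i]
        rw [hre, ih xs' (P ++ [0]) x c (j + 1) hx' (by omega)
            (by simp; omega) (by simp at hN; omega)]
        simp [pvGreedy, List.replicate_succ]
      | true =>
        rw [if_pos (by simp [pvB2i])]
        have e2 : PySem.List.pySetD (P ++ pvB2i true :: (x :: xs').map pvB2i) (j - 1) 0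
            = (P ++ [0]) ++ pvB2i x :: xs'.map pvB2i := by
          rw [hP, pvSetD_append_len]; simp
        rw [e2]
        have hj2 : j = (((P ++ [(0:Int)]).length : Nat) : Int) := by simp; omega
        have e3 : PySem.List.pyGetD ((P ++ [0]) ++ pvB2i x :: xs'.map pvB2i) j 0 = pvB2i x := by
          rw [hj2]; exact pvGetD_append_len _ _ _ 0
        have e4 : PySem.List.pySetD ((P ++ [0]) ++ pvB2i x :: xs'.map pvB2i) j (pvB2i (!x))
            = (P ++ [0]) ++ pvB2i (!x) :: xs'.map pvB2i := by
          rw [hj2]; exact pvSetD_append_len _ _ _ _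
        rw [e3, pvMod2_flip, e4]
        cases xs' with
        | nil =>
          have hm0 : m = 0 := by simpa using hx'.symm
          rw [if_neg (by omega)]
          have hle : N ≤ j + 1 := by omega
          rw [PySem.List.pyRange_one_eq_nil hle]
          simp [pvGreedy, List.replicate_succ]
        | cons y ys =>
          rw [if_pos (by simp at hx'; omega)]
          have hj3 : j + 1 = ((((P ++ [0]) ++ [pvB2i (!x)]).length : Nat) : Int) := by
            simp; omega
          have e5 : PySem.List.pyGetD ((P ++ [0]) ++ pvB2i (!x) :: (y :: ys).map pvB2i) (j + 1) 0
              = pvB2i y := by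
            have : (P ++ [0]) ++ pvB2i (!x) :: (y :: ys).map pvB2i
                = ((P ++ [0]) ++ [pvB2i (!x)]) ++ pvB2i y :: ys.map pvB2i := by simp
            rw [this, hj3]; exact pvGetD_append_len _ _ _ 0
          have e6 : PySem.List.pySetD ((P ++ [0]) ++ pvB2i (!x) :: (y :: ys).map pvB2i) (j + 1) (pvB2i (!y))
              = (P ++ [0]) ++ pvB2i (!x) :: ((!y) :: ys).map pvB2i := by
            have : (P ++ [0]) ++ pvB2i (!x) :: (y :: ys).map pvB2i
                = ((P ++ [0]) ++ [pvB2i (!x)]) ++ pvB2i y :: ys.map pvB2i := by simp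
            rw [this, hj3, pvSetD_append_len]; simp
          rw [e5, pvMod2_flip, e6,
              ih ((!y) :: ys) (P ++ [0]) (!x) (c + 1) (j + 1)
                (by simpa using hx') (by omega) (by simp; omega)
                (by simp at hN ⊢; omega)]
          have hg : pvGreedy true false c (x :: y :: ys)
              = pvGreedy (!x) false (c + 1) ((!y) :: ys) := by
            rw [show pvGreedy true false c (x :: y :: ys)
                = pvGreedy (!(x != false)) true (c + 1) (y :: ys) by simp [pvGreedy]]
            rw [pvGreedy_pend]
            simp [pvFlipHead]
          rw [hg]
          simp [List.replicate_succ]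

/-- B's closed-form pass as structural recursion on the diff list: `a`, `b`, `c` are the
three mod-3 residue-class prefix parities; the last element is never counted. -/
def pvBrec (a b c p : Bool) (cnt : Int) : List Bool → Bool × Int
  | [] => (p, cnt)
  | x :: xs =>
    pvBrec c (a != x) b ((a != x) != b)
      (if ((a != x) != b) ∧ xs ≠ [] then cnt + 1 else cnt) xs

theorem pvGreedy_step (p pend : Bool) (c : Int) (x : Bool) (xs : List Bool) :
    pvGreedy p pend c (x :: xs) = pvGreedy ((x != pend) != p) p (c + pvB2i p) xs := by
  cases p <;> cases x <;> cases pend <;> simp [pvGreedy, pvB2i]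

theorem pvGreedy_shift (l : List Bool) : ∀ (p pend : Bool) (c k : Int),
    pvGreedy p pend (c + k) l = ((pvGreedy p pend c l).1, (pvGreedy p pend c l).2 + k) := by
  induction l with
  | nil => intro p pend c k; simp [pvGreedy]
  | cons x xs ih =>
    intro p pend c k
    rw [pvGreedy_step, pvGreedy_step, show c + k + pvB2i p = (c + pvB2i p) + k by ring, ih]

/-- The mod-3 parity pass computes the greedy pass: same residual, and the greedy
count exceeds the parity count by exactly the initial effective value `b != c`. -/
theorem pvBrec_greedy (xs : List Bool) : ∀ (x a b c : Bool) (cnt : Int),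
    pvBrec a b c (b != c) cnt (x :: xs)
      = ((pvGreedy (b != c) (a != c) cnt (x :: xs)).1,
         (pvGreedy (b != c) (a != c) cnt (x :: xs)).2 - pvB2i (b != c)) := by
  induction xs with
  | nil =>
    intro x a b c cnt
    cases a <;> cases b <;> cases c <;> cases x <;>
      simp [pvBrec, pvGreedy, pvB2i]
  | cons y ys ih =>
    intro x a b c cnt
    have hstep : pvBrec a b c (b != c) cnt (x :: y :: ys)
        = pvBrec c (a != x) b ((a != x) != b) (cnt + pvB2i ((a != x) != b)) (y :: ys) := by
      by_cases hp : ((a != x) != b) = true <;> simp [pvBrec, hp, pvB2i]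
    have hid : ((x != (a != c)) != (b != c)) = ((a != x) != b) := by
      cases a <;> cases b <;> cases c <;> cases x <;> rfl
    have hpend : (c != b) = (b != c) := by cases b <;> cases c <;> rfl
    have hIH := ih y c (a != x) b (cnt + pvB2i ((a != x) != b))
    rw [hpend] at hIH
    rw [show ((a != x) != b) = ((a != x) != b) from rfl] at hIH
    rw [hstep, pvGreedy_step, hid]
    have hBp : ((a != x) != b) = ((a != x) != b) := rfl
    -- rewrite the pvBrec side with the IH (its p-argument is (a!=x) != b = b_new != c_new)
    rw [show pvBrec c (a != x) b ((a != x) != b) (cnt + pvB2i ((a != x) != b)) (y :: ys)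
        = pvBrec c (a != x) b (((a != x)) != b) (cnt + pvB2i ((a != x) != b)) (y :: ys) from rfl,
      hIH]
    have hsh : pvGreedy ((a != x) != b) (b != c) (cnt + pvB2i (b != c)) (y :: ys)
        = ((pvGreedy ((a != x) != b) (b != c) (cnt + pvB2i ((a != x) != b)) (y :: ys)).1,
           (pvGreedy ((a != x) != b) (b != c) (cnt + pvB2i ((a != x) != b)) (y :: ys)).2
             + (pvB2i (b != c) - pvB2i ((a != x) != b))) := by
      rw [show cnt + pvB2i (b != c)
          = (cnt + pvB2i ((a != x) != b)) + (pvB2i (b != c) - pvB2i ((a != x) != b)) by ring,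
        pvGreedy_shift]
    rw [hsh]
    refine Prod.ext rfl ?_
    simp only
    ring

/-- B's main loop (a fold over `range(1, N+1)` reading the fixed diff list)
is the structural recursion `pvBrec` over the corresponding suffix. -/
theorem pvLoopB (diff : List Bool) (N : Int) (hN : N = (diff.length : Int)) :
    ∀ (m : Nat) (j : Int) (a b c p : Bool) (cnt : Int),
    1 ≤ j → m = ((N + 1) - j).toNat →
    (((PySem.List.pyRange j (N + 1) 1).foldl
        (fun (s : Bool × Bool × Bool × Bool × Int) i =>
          (s.2.2.1, s.1 != PySem.List.pyGetD diff (i - 1) false, s.2.1,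
           (s.1 != PySem.List.pyGetD diff (i - 1) false) != s.2.1,
           if ((s.1 != PySem.List.pyGetD diff (i - 1) false) != s.2.1) ∧ i < N
           then s.2.2.2.2 + 1 else s.2.2.2.2))
        (a, b, c, p, cnt)).2.2.2.1,
     ((PySem.List.pyRange j (N + 1) 1).foldl
        (fun (s : Bool × Bool × Bool × Bool × Int) i =>
          (s.2.2.1, s.1 != PySem.List.pyGetD diff (i - 1) false, s.2.1,
           (s.1 != PySem.List.pyGetD diff (i - 1) false) != s.2.1,
           if ((s.1 != PySem.List.pyGetD diff (i - 1) false) != s.2.1) ∧ i < N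
           then s.2.2.2.2 + 1 else s.2.2.2.2))
        (a, b, c, p, cnt)).2.2.2.2)
    = pvBrec a b c p cnt (diff.drop (j - 1).toNat) := by
  intro m
  induction m with
  | zero =>
    intro j a b c p cnt hj hm
    have hle : N + 1 ≤ j := by omega
    rw [PySem.List.pyRange_one_eq_nil hle,
        List.drop_eq_nil_of_le (show diff.length ≤ (j - 1).toNat by omega)]
    simp [pvBrec]
  | succ m ih =>
    intro j a b c p cnt hj hm
    have hlt : j < N + 1 := by omega
    have hjl : (j - 1).toNat < diff.length := by omega
    rw [PySem.List.pyRange_one_cons hlt, List.foldl_cons,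
        List.drop_eq_getElem_cons hjl]
    have hget : PySem.List.pyGetD diff (j - 1) false = diff[(j - 1).toNat] :=
      PySem.List.pyGetD_eq_getElem diff false (by omega) (by omega)
    have hdrop : diff.drop ((j + 1) - 1).toNat = diff.drop ((j - 1).toNat + 1) := by
      congr 1; omega
    have hguard : (j < N) ↔ diff.drop ((j - 1).toNat + 1) ≠ [] := by
      rw [ne_eq, List.drop_eq_nil_iff]
      omega
    dsimp only
    rw [hget]
    by_cases hjN : j < N
    · have hne : diff.drop ((j - 1).toNat + 1) ≠ [] := hguard.mp hjN
      have hif : (if ((a != diff[(j - 1).toNat]) != b) ∧ j < N then cnt + 1 else cnt)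
          = (if ((a != diff[(j - 1).toNat]) != b) ∧ diff.drop ((j - 1).toNat + 1) ≠ []
             then cnt + 1 else cnt) := by
        by_cases hb : ((a != diff[(j - 1).toNat]) != b) = true
        · rw [if_pos ⟨hb, hjN⟩, if_pos ⟨hb, hne⟩]
        · rw [if_neg (fun h => hb h.1), if_neg (fun h => hb h.1)]
      rw [hif, ih (j + 1) c (a != diff[(j - 1).toNat]) b ((a != diff[(j - 1).toNat]) != b) _
          (by omega) (by omega), hdrop]
      rfl
    · have hnil : diff.drop ((j - 1).toNat + 1) = [] := by
        rw [List.drop_eq_nil_iff]; omega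
      have hif : (if ((a != diff[(j - 1).toNat]) != b) ∧ j < N then cnt + 1 else cnt)
          = (if ((a != diff[(j - 1).toNat]) != b) ∧ diff.drop ((j - 1).toNat + 1) ≠ []
             then cnt + 1 else cnt) := by
        by_cases hb : ((a != diff[(j - 1).toNat]) != b) = true
        · rw [if_neg (fun h => hjN h.2), if_neg (fun h => h.2 hnil)]
        · rw [if_neg (fun h => hb h.1), if_neg (fun h => hb h.1)]
      rw [hif, ih (j + 1) c (a != diff[(j - 1).toNat]) b ((a != diff[(j - 1).toNat]) != b) _
          (by omega) (by omega), hdrop]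
      rfl

theorem pvGetD_zero {α : Type} (y : α) (l : List α) (d : α) :
    PySem.List.pyGetD (y :: l) 0 d = y := by
  simp [PySem.List.pyGetD]

theorem pvSetD_zero {α : Type} (y : α) (l : List α) (v : α) :
    PySem.List.pySetD (y :: l) 0 v = v :: l := by
  simpa using pvSetD_append_len [] y l v

theorem pvGetD_one {α : Type} (y z : α) (l : List α) (d : α) :
    PySem.List.pyGetD (y :: z :: l) 1 d = z := by
  simpa using pvGetD_append_len [y] z l d

theorem pvSetD_one {α : Type} (y z : α) (l : List α) (v : α) :
    PySem.List.pySetD (y :: z :: l) 1 v = y :: v :: l := by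
  simpa using pvSetD_append_len [y] z l v

/-- A's first loop (index-wise writes into the zero array) builds the per-index map. -/
theorem pvBuildA_aux (c : Int → Prop) [DecidablePred c] : ∀ (n : Nat) (acc : List Int), n ≤ acc.length →
    (PySem.List.pyRange 0 (n : Int) 1).foldl
      (fun d i => if c i then PySem.List.pySetD d i 1 else PySem.List.pySetD d i 0) acc
    = (PySem.List.pyRange 0 (n : Int) 1).map (fun i => if c i then 1 else 0) ++ acc.drop n := by
  intro n
  induction n with
  | zero => simp [PySem.List.pyRange_one_eq_nil]
  | succ n ih =>
    intro acc h
    have hcast : ((n + 1 : Nat) : Int) = (n : Int) + 1 := by push_cast; omega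
    rw [hcast, PySem.List.pyRange_one_succ_right (by omega), List.foldl_append,
        List.map_append, ih acc (by omega), List.foldl_cons, List.foldl_nil]
    have hlen : ((PySem.List.pyRange 0 (n:Int) 1).map (fun i => if c i then (1:Int) else 0)).length = n := by
      simp [PySem.List.length_pyRange_one]
    have hset : ∀ v : Int,
        PySem.List.pySetD ((PySem.List.pyRange 0 (n:Int) 1).map (fun i => if c i then (1:Int) else 0) ++ acc.drop n) (n:Int) v
        = (PySem.List.pyRange 0 (n:Int) 1).map (fun i => if c i then (1:Int) else 0) ++ v :: acc.drop (n+1) := by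
      intro v
      rw [PySem.List.pySetD_natCast, List.set_append_right _ _ (by omega), hlen, Nat.sub_self,
          List.drop_eq_getElem_cons (show n < acc.length by omega), List.set_cons_zero]
    split_ifs with hc <;> simp [hset, hc]

theorem pvBuildA (N : Int) (c : Int → Prop) [DecidablePred c] (h : 0 ≤ N) :
    (PySem.List.pyRange 0 N 1).foldl
      (fun d i => if c i then PySem.List.pySetD d i 1 else PySem.List.pySetD d i 0)
      (List.replicate N.toNat (0:Int))
    = (PySem.List.pyRange 0 N 1).map (fun i => if c i then (1:Int) else 0) := by
  have hN : N = ((N.toNat : Nat) : Int) := by omega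
  rw [hN, show ((N.toNat : Nat) : Int).toNat = N.toNat by omega]
  refine (pvBuildA_aux c N.toNat (List.replicate N.toNat 0) (by simp)).trans ?_
  simp

/-- the final rescan of A on `zeros ++ [flag]` reads off the flag -/
theorem pvScanTail (k : Nat) (b : Bool) :
    (List.replicate k (0:Int) ++ [pvB2i b]).any (fun v => v ≠ 0) = b := by
  induction k with
  | zero => cases b <;> simp [pvB2i]
  | succ k ih => simpa [List.replicate_succ] using ih

/-- index scan = element scan -/
theorem pvScanIdx (L : List Int) (N : Int) (h : N = (L.length : Int)) :
    (PySem.List.pyRange 0 N 1).any (fun i => decide (PySem.List.pyGetD L i 0 ≠ 0))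
    = L.any (fun v => decide (v ≠ 0)) := by
  subst h
  conv_rhs => rw [← PySem.List.map_pyGetD_pyRange_zero' L 0]
  rw [List.any_map]
  rfl

/-- Peeling the first `pvBrec` step and applying `pvBrec_greedy` + the count shift:
the whole parity pass from the all-false state equals the greedy pass started
at the first diff value. -/
theorem pvBrec_eq_greedy (d0 : Bool) (tl : List Bool) (cnt : Int) :
    pvBrec false false false false cnt (d0 :: tl) = pvGreedy d0 false cnt tl := by
  cases tl with
  | nil => cases d0 <;> simp [pvBrec, pvGreedy]
  | cons y ys =>
    have h1 : pvBrec false false false false cnt (d0 :: y :: ys)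
        = pvBrec false d0 false d0 (cnt + pvB2i d0) (y :: ys) := by
      cases d0 <;> simp [pvBrec, pvB2i]
    have h2 := pvBrec_greedy ys y false d0 false (cnt + pvB2i d0)
    have hb : (d0 != false) = d0 := by cases d0 <;> rfl
    have hp : ((false != false : Bool)) = false := rfl
    rw [hb, hp] at h2
    rw [h1, h2, show cnt + pvB2i d0 = cnt + pvB2i d0 from rfl,
        pvGreedy_shift (y :: ys) d0 false cnt (pvB2i d0)]
    refine Prod.ext rfl ?_
    simp only
    ring

-- ===== VERDICT (by name: the statement is the Claim_ definition above) =====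
theorem changing_spec : Claim_equal_changing := by
  intro sIdx start target N hdom hpre
  obtain ⟨hs, ht, h0⟩ := hpre
  unfold Spec_changing
  simp only [changing, changing_alt]
  by_cases hN0 : N ≤ 0
  · have hsne : ¬ sIdx = 0 := by intro h; have := h0 h; omega
    rw [PySem.List.pyRange_one_eq_nil (show N ≤ (0:Int) from hN0),
        PySem.List.pyRange_one_eq_nil (show N ≤ (1:Int) by omega),
        PySem.List.pyRange_one_eq_nil (show N + 1 ≤ (1:Int) by omega)]
    simp [hsne]
  · have hN1 : (0:Int) < N := by omega
    clear hN0
    rw [pvBuildA N (fun i => PySem.List.pyGetD start i 0 ≠ PySem.List.pyGetD target i 0) (by omega)]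
    have hmap : (PySem.List.pyRange 0 N 1).map
        (fun i => if PySem.List.pyGetD start i 0 ≠ PySem.List.pyGetD target i 0 then (1:Int) else 0)
        = ((PySem.List.pyRange 0 N 1).map
            (fun i => decide (PySem.List.pyGetD start i 0 ≠ PySem.List.pyGetD target i 0))).map pvB2i := by
      rw [List.map_map]
      refine List.map_congr_left ?_
      intro i _
      by_cases h : PySem.List.pyGetD start i 0 ≠ PySem.List.pyGetD target i 0 <;>
        simp [pvB2i, h]
    rw [hmap]
    have hlen0 : ((PySem.List.pyRange 0 N 1).map
        (fun i => decide (PySem.List.pyGetD start i 0 ≠ PySem.List.pyGetD target i 0))).length = N.toNat := by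
      simp [PySem.List.length_pyRange_one]
    generalize hD0 : (PySem.List.pyRange 0 N 1).map
        (fun i => decide (PySem.List.pyGetD start i 0 ≠ PySem.List.pyGetD target i 0)) = D0 at *
    cases D0 with
    | nil => simp at hlen0; omega
    | cons b0 tl =>
      by_cases hsi : sIdx = 0
      · -- sIdx = 0: flip the first two entries; N ≥ 2 so the tail is nonempty
        have hN2 : 2 ≤ N := h0 hsi
        cases tl with
        | nil => simp at hlen0; omega
        | cons b1 rest =>
          simp only [if_pos hsi, List.map_cons, pvGetD_zero, pvMod2_flip, pvSetD_zero,
            pvGetD_one, pvSetD_one]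
          rw [show (pvB2i (!b0) :: pvB2i (!b1) :: rest.map pvB2i, (1:Int))
              = (([]:List Int) ++ pvB2i (!b0) :: ((!b1) :: rest).map pvB2i, (1:Int)) by simp]
          rw [pvLoopA N ((!b1) :: rest).length ((!b1) :: rest) [] (!b0) 1 1 rfl le_rfl
              (by simp) (by simp at hlen0 ⊢; omega)]
          rw [show ([]:List Int) ++ (List.replicate ((!b1) :: rest).length (0:Int)
              ++ [pvB2i (pvGreedy (!b0) false 1 ((!b1) :: rest)).1])
              = List.replicate ((!b1) :: rest).length (0:Int)
              ++ [pvB2i (pvGreedy (!b0) false 1 ((!b1) :: rest)).1] by simp]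
          rw [pvScanIdx _ N (by simp at hlen0 ⊢; omega), pvScanTail]
          have hNlen : N = ((((!b0) :: (!b1) :: rest).length : Nat) : Int) := by
            simp at hlen0 ⊢; omega
          have hF := pvLoopB ((!b0) :: (!b1) :: rest) N hNlen ((N + 1) - 1).toNat 1
              false false false false 1 le_rfl rfl
          rw [show ((1:Int) - 1).toNat = 0 by omega, List.drop_zero,
              pvBrec_eq_greedy (!b0) ((!b1) :: rest) 1] at hF
          rcases hGr : pvGreedy (!b0) false 1 ((!b1) :: rest) with ⟨res, kc⟩
          rw [hGr] at hF
          have hF1 := congrArg Prod.fst hF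
          have hF2 := congrArg Prod.snd hF
          dsimp only at hF1 hF2
          rw [hF1, hF2]
      · -- sIdx ≠ 0: no adjustment
        simp only [if_neg hsi]
        rw [show ((b0 :: tl).map pvB2i, (0:Int))
            = (([]:List Int) ++ pvB2i b0 :: tl.map pvB2i, (0:Int)) by simp]
        rw [pvLoopA N tl.length tl [] b0 0 1 rfl le_rfl (by simp)
            (by simp at hlen0 ⊢; omega)]
        rw [show ([]:List Int) ++ (List.replicate tl.length (0:Int)
            ++ [pvB2i (pvGreedy b0 false 0 tl).1])
            = List.replicate tl.length (0:Int) ++ [pvB2i (pvGreedy b0 false 0 tl).1] by simp]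
        rw [pvScanIdx _ N (by simp at hlen0 ⊢; omega), pvScanTail]
        have hNlen : N = (((b0 :: tl).length : Nat) : Int) := by simp at hlen0 ⊢; omega
        have hF := pvLoopB (b0 :: tl) N hNlen ((N + 1) - 1).toNat 1
            false false false false 0 le_rfl rfl
        rw [show ((1:Int) - 1).toNat = 0 by omega, List.drop_zero,
            pvBrec_eq_greedy b0 tl 0] at hF
        rcases hGr : pvGreedy b0 false 0 tl with ⟨res, kc⟩
        rw [hGr] at hF
        have hF1 := congrArg Prod.fst hF
        have hF2 := congrArg Prod.snd hF
        dsimp only at hF1 hF2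
        rw [hF1, hF2]
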